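-- pv_equiv track=rewrite | github.com/keijak/comp-pub | abc114/c.py | check
-- ===== SOURCE A (Python) =====
-- def check(k):
--     h3 = h5 = h7 = False
--     while k:
--         d = k%10
--         h3 |= d == 3
--         h5 |= d == 5
--         h7 |= d == 7
--         k //= 10
--     return h3 and h5 and h7
-- ===== SOURCE B (Python) =====
-- def check(k):
--     s = str(k)
--     return '3' in s and '5' in s and '7' in s
-- ===== Notes on version B (the rewrite author's own statement) =====
-- stated objective: simpler
-- what changed: Replaces the arithmetic digit-extraction loop with three boolean accumulators by converting k to its decimal string once and testing substring membership of '3', '5' and '7'.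
import Mathlib
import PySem

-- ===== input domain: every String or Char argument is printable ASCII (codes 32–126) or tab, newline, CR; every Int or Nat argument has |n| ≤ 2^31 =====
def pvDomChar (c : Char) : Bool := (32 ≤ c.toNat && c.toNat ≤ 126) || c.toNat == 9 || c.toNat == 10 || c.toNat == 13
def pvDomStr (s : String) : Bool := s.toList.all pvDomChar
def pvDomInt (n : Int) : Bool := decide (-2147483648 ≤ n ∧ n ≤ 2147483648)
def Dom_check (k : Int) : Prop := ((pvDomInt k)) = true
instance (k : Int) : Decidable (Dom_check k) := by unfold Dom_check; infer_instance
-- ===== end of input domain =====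

-- B replaces A's arithmetic digit-extraction loop (three boolean accumulators, % and //)
-- by converting k to its decimal string once and testing substring membership (objective: simpler).


-- ===== PORT A =====
-- A's while-loop; the fuel k.natAbs + 1 only makes the recursion total — on every k ≥ 0
-- (the inputs Pre_check admits, exactly where the Python loop terminates) it never runs out.
def checkLoop : Nat → Int → Bool → Bool → Bool → Bool
  | 0, _, h3, h5, h7 => h3 && h5 && h7
  | fuel + 1, k, h3, h5, h7 =>
    if k == 0 then h3 && h5 && h7
    else
      let d := PySem.Int.mod k 10
      checkLoop fuel (PySem.Int.floordiv k 10)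
        (h3 || (d == 3)) (h5 || (d == 5)) (h7 || (d == 7))

def check (k : Int) : Bool := checkLoop (k.natAbs + 1) k false false false

-- ===== PORT B =====
def check_alt (k : Int) : Bool :=
  let s := PySem.Int.toStr k
  PySem.Str.isIn "3" s && PySem.Str.isIn "5" s && PySem.Str.isIn "7" s

-- ===== PRECONDITION & SPEC =====
-- Pre_check excludes negative k, where the Python A never returns (the floor division stalls and the loop never ends).
def Pre_check (k : Int) : Prop := 0 ≤ k
instance (k : Int) : Decidable (Pre_check k) := by unfold Pre_check; infer_instance
def pvWitness_check : Int := (357)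
def Spec_check (k : Int) (out : Bool) : Prop := out = check_alt k
instance (k : Int) (out : Bool) : Decidable (Spec_check k out) := by unfold Spec_check; infer_instance

-- ===== CLAIM (what is proved, stated in full; the proofs are below) =====
def Claim_equal_check : Prop := ∀ (k : Int), Dom_check k → Pre_check k → Spec_check k (check k)

-- ===== LEMMAS AND PROOFS =====

-- Nat.toDigits agrees with Nat.digits (reversed, mapped through digitChar) on positive n.
theorem toDigitsCore_eq (fuel : Nat) : ∀ (n : Nat) (ds : List Char), n < fuel → 0 < n →
    Nat.toDigitsCore 10 fuel n ds = ((Nat.digits 10 n).map Nat.digitChar).reverse ++ ds := by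
  induction fuel with
  | zero => intro n ds h; omega
  | succ f ih =>
    intro n ds hlt hpos
    rw [Nat.toDigitsCore]
    rw [Nat.digits_def' (by norm_num : 1 < 10) hpos]
    by_cases h10 : n / 10 = 0
    · simp [h10, Nat.digits_zero]
    · have hdiv : n / 10 < n := Nat.div_lt_self hpos (by norm_num)
      simp only [h10, if_false]
      rw [ih (n / 10) _ (by omega) (Nat.pos_of_ne_zero h10)]
      simp

theorem toDigits_eq_of_pos {n : Nat} (h : 0 < n) :
    Nat.toDigits 10 n = ((Nat.digits 10 n).map Nat.digitChar).reverse ++ [] := by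
  exact toDigitsCore_eq (n + 1) n [] (by omega) h

-- membership of a digit character in str(n) for n >= 0, nonzero d < 10
theorem digitChar_inj {e d : Nat} (he : e < 10) (hd : d < 10)
    (h : Nat.digitChar e = Nat.digitChar d) : e = d := by
  interval_cases e <;> interval_cases d <;> first | rfl | (exact absurd h (by decide))

theorem mem_toChars_iff {k : Int} (hk : 0 ≤ k) (d : Nat) (hd : d < 10) (hd0 : 0 < d) :
    Nat.digitChar d ∈ PySem.Int.toChars k ↔ d ∈ Nat.digits 10 k.toNat := by
  unfold PySem.Int.toChars
  rw [if_neg (by omega)]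
  rcases Nat.eq_zero_or_pos k.toNat with h0 | hpos
  · rw [h0]
    constructor
    · intro hmem
      have hz : Nat.toDigits 10 0 = ['0'] := rfl
      rw [hz] at hmem
      simp only [List.mem_singleton] at hmem
      have : d = 0 := digitChar_inj hd (by norm_num) (by rw [hmem]; rfl)
      omega
    · simp
  · rw [toDigits_eq_of_pos hpos]
    simp only [List.append_nil, List.mem_reverse, List.mem_map]
    constructor
    · rintro ⟨e, he, heq⟩
      have he10 : e < 10 := Nat.digits_lt_base (by norm_num) he
      have : e = d := digitChar_inj he10 hd heq
      exact this ▸ he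
    · intro hmem; exact ⟨d, hmem, rfl⟩

-- loop characterization
theorem checkLoop_eq (fuel : Nat) : ∀ (k : Int), 0 ≤ k → k.natAbs < fuel → ∀ h3 h5 h7 : Bool,
    checkLoop fuel k h3 h5 h7 =
      ((h3 || decide (3 ∈ Nat.digits 10 k.toNat)) &&
       (h5 || decide (5 ∈ Nat.digits 10 k.toNat)) &&
       (h7 || decide (7 ∈ Nat.digits 10 k.toNat))) := by
  induction fuel with
  | zero => intro k _ h; omega
  | succ f ih =>
    intro k hk hlt h3 h5 h7
    rw [checkLoop]
    by_cases hz : k = 0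
    · simp [hz]
    · have hpos : 0 < k := lt_of_le_of_ne hk (Ne.symm hz)
      rw [if_neg (by simpa using hz)]
      have hmod : PySem.Int.mod k 10 = ((k.toNat % 10 : Nat) : Int) := by
        unfold PySem.Int.mod
        rw [Int.fmod_eq_emod]
        simp only [show ((0:Int) ≤ 10 ∨ (10:Int) ∣ k) from Or.inl (by norm_num), if_pos]
        omega
      have hdiv : PySem.Int.floordiv k 10 = ((k.toNat / 10 : Nat) : Int) := by
        unfold PySem.Int.floordiv
        rw [Int.fdiv_eq_ediv]
        simp only [show ((0:Int) ≤ 10 ∨ (10:Int) ∣ k) from Or.inl (by norm_num), if_pos]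
        omega
      have hlt' : (((k.toNat / 10 : Nat)) : Int).natAbs < f := by
        have : k.toNat / 10 < k.toNat := Nat.div_lt_self (by omega) (by norm_num)
        simp only [Int.natAbs_natCast]
        omega
      simp only [hmod, hdiv, ih _ (Int.natCast_nonneg _) hlt']
      rw [Nat.digits_def' (by norm_num : 1 < 10) (by omega : 0 < k.toNat)]
      have tn : ((k.toNat / 10 : Nat) : Int).toNat = k.toNat / 10 := by omega
      rw [tn]
      have e3 : ((((k.toNat % 10 : Nat) : Int)) == (3 : Int)) = decide (k.toNat % 10 = 3) := by
        by_cases h : k.toNat % 10 = 3 <;> simp [h] <;> omega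
      have e5 : ((((k.toNat % 10 : Nat) : Int)) == (5 : Int)) = decide (k.toNat % 10 = 5) := by
        by_cases h : k.toNat % 10 = 5 <;> simp [h] <;> omega
      have e7 : ((((k.toNat % 10 : Nat) : Int)) == (7 : Int)) = decide (k.toNat % 10 = 7) := by
        by_cases h : k.toNat % 10 = 7 <;> simp [h] <;> omega
      rw [e3, e5, e7]
      have key : ∀ (b : Bool) (m : Nat) (l : List Nat) (d : Nat),
          (b || decide (m = d) || decide (d ∈ l)) = (b || decide (d ∈ m :: l)) := by
        intro b m l d
        simp [List.mem_cons, Bool.decide_or, Bool.or_assoc, eq_comm]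
      rw [key, key, key]

theorem check_alt_eq {k : Int} (hk : 0 ≤ k) :
    check_alt k = ((decide (3 ∈ Nat.digits 10 k.toNat)) &&
      (decide (5 ∈ Nat.digits 10 k.toNat)) && (decide (7 ∈ Nat.digits 10 k.toNat))) := by
  have h : ∀ (cs : String) (d : Nat), d < 10 → 0 < d → cs.toList = [Nat.digitChar d] →
      PySem.Str.isIn cs (PySem.Int.toStr k) = decide (d ∈ Nat.digits 10 k.toNat) := by
    intro cs d hd hd0 hc
    have hiff := PySem.Str.isIn_iff_infix (sub := cs) (s := PySem.Int.toStr k)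
    rw [PySem.Int.toList_toStr, hc, List.singleton_infix_iff] at hiff
    rcases Bool.eq_false_or_eq_true (PySem.Str.isIn cs (PySem.Int.toStr k)) with hb | hb
    · rw [hb]
      have hmem : Nat.digitChar d ∈ PySem.Int.toChars k := hiff.mp hb
      rw [mem_toChars_iff hk d hd hd0] at hmem
      simp [hmem]
    · rw [hb]
      have hnm : ¬ Nat.digitChar d ∈ PySem.Int.toChars k := by
        intro hmem; rw [← hiff] at hmem; rw [hb] at hmem; exact Bool.false_ne_true hmem
      rw [(mem_toChars_iff hk d hd hd0).not] at hnm
      simp [hnm]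
  simp only [check_alt]
  rw [h "3" 3 (by norm_num) (by norm_num) (by decide),
      h "5" 5 (by norm_num) (by norm_num) (by decide),
      h "7" 7 (by norm_num) (by norm_num) (by decide)]

-- ===== VERDICT (by name: the statement is the Claim_ definition above) =====
theorem check_spec : Claim_equal_check := by
  intro k _ hk
  unfold Spec_check check
  rw [checkLoop_eq _ k hk (by omega), check_alt_eq hk]
  simp
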